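-- pv_equiv track=rewrite | github.com/joernwichmann/gen-Stokes | src/utils.py | swap_dictionary_keys
-- ===== SOURCE A (Python) =====
-- from typing import TypeVar
--
-- Keys1 = TypeVar("Keys1")
--
-- Keys2 = TypeVar("Keys2")
--
-- Values = TypeVar("Values")
--
-- def swap_dictionary_keys(key1_to_key2_to_value: dict[Keys1,dict[Keys2, Values]]) -> dict[Keys2, dict[Keys1, Values]]:
--     """Change 'Key1 -> Key2 -> Value' to 'Key2 -> Key1 -> Value'.
--
--     In more detail: We first generate the product space (Key1, Key2(Key1)).
--     Afterwards we compute the number of entries in (:, Key2).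
--     Finally we define Key2 -> Key1(Key2) -> Values."""
--     #Generate product space
--     tuple_set = set()
--     length_dict = dict()
--     for key1 in key1_to_key2_to_value.keys():
--         for key2 in key1_to_key2_to_value[key1].keys():
--             tuple_set.add((key2,key1))
--             length_dict[key2] = 0
--
--     #compute Key1(Key2), i.e., how often does Key2 appear.
--     for key2, key1 in tuple_set:
--         length_dict[key2] += 1
--
--     key1_to_value = dict()
--     key2_to_key1_to_value = dict()
--     counter = 0
--     for key2, key1 in sorted(tuple_set):
--         key1_to_value[key1] =  key1_to_key2_to_value[key1][key2]
--         counter += 1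
--         if counter == length_dict[key2]:
--             key2_to_key1_to_value[key2] = key1_to_value
--             key1_to_value = dict()
--             counter = 0
--
--     return key2_to_key1_to_value
-- ===== SOURCE B (Python) =====
-- def swap_dictionary_keys(key1_to_key2_to_value):
--     """Change 'Key1 -> Key2 -> Value' to 'Key2 -> Key1 -> Value'."""
--     key2s = sorted({key2 for inner in key1_to_key2_to_value.values() for key2 in inner})
--     return {
--         key2: {
--             key1: key1_to_key2_to_value[key1][key2]
--             for key1 in sorted(key1_to_key2_to_value)
--             if key2 in key1_to_key2_to_value[key1]
--         }
--         for key2 in key2s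
--     }
-- ===== Notes on version B (the rewrite author's own statement) =====
-- stated objective: simpler
-- what changed: A sorts the whole (key2,key1) pair set and replays it through a counting dict plus a counter/run-boundary state machine; B drops the pair sort, the length dict and all mutable run state and directly builds {key2: {key1: value}} by iterating the sorted distinct key2s and, for each, filtering the sorted key1s.
import Mathlib
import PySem

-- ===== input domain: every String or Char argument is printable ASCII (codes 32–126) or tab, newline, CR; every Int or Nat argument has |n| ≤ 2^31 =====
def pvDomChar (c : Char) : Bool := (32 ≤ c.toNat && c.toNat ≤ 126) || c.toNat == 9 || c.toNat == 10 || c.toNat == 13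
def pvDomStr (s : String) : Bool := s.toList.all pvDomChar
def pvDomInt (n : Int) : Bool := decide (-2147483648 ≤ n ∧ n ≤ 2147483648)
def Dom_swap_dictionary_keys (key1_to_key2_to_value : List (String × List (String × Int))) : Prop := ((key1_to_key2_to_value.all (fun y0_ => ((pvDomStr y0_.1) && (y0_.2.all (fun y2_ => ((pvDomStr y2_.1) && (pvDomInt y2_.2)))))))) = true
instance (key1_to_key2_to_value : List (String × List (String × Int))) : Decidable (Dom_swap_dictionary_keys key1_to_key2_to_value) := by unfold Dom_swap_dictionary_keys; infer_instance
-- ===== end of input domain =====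

-- B replaces A's sort-all-pairs + counting pass + counter/run-boundary state machine by a
-- direct nested construction (sorted distinct key2s, each paired with a filtered scan of the
-- sorted key1s): simpler, no length dict and no mutable run state.

-- ===== PORT A =====
def swap_dictionary_keys (key1_to_key2_to_value : List (String × List (String × Int))) : List (String × List (String × Int)) :=
  let dd : PySem.Dict String (List (String × Int)) := PySem.Dict.mk key1_to_key2_to_value
  -- for key1 in d.keys(): for key2 in d[key1].keys(): tuple_set.add((key2, key1)); length_dict[key2] = 0
  let st1 : PySem.Set (String × String) × PySem.Dict String Int :=
    dd.keys.foldl (fun st key1 =>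
      (PySem.Dict.mk (dd.getD key1 [])).keys.foldl
        (fun st key2 => (PySem.Set.add st.1 (key2, key1), st.2.insert key2 0)) st)
      (PySem.Set.empty, PySem.Dict.empty)
  let tuple_set : PySem.Set (String × String) := st1.1
  -- for key2, key1 in tuple_set: length_dict[key2] += 1   (a count: independent of the set's iteration order)
  let length_dict : PySem.Dict String Int :=
    tuple_set.foldl (fun ld p => ld.modify p.1 0 (· + 1)) st1.2
  -- for key2, key1 in sorted(tuple_set): key1_to_value[key1] = d[key1][key2]; counter += 1;
  --   if counter == length_dict[key2]: emit and reset.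
  -- (p = (key2, key1); state st = (key1_to_value, key2_to_key1_to_value, counter))
  let st2 : PySem.Dict String Int × PySem.Dict String (PySem.Dict String Int) × Int :=
    (PySem.List.sorted2 tuple_set (fun p => p.1) (fun p => p.2) false).foldl
      (fun st p =>
        if st.2.2 + 1 == length_dict.getD p.1 0 then
          (PySem.Dict.empty,
           st.2.1.insert p.1 (st.1.insert p.2 ((PySem.Dict.mk (dd.getD p.2 [])).getD p.1 0)), (0 : Int))
        else
          (st.1.insert p.2 ((PySem.Dict.mk (dd.getD p.2 [])).getD p.1 0), st.2.1, st.2.2 + 1))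
      (PySem.Dict.empty, PySem.Dict.empty, 0)
  st2.2.1.items.map (fun q => (q.1, q.2.items))

-- ===== PORT B =====
def swap_dictionary_keys_alt (key1_to_key2_to_value : List (String × List (String × Int))) : List (String × List (String × Int)) :=
  let dd : PySem.Dict String (List (String × Int)) := PySem.Dict.mk key1_to_key2_to_value
  -- key2s = sorted({key2 for inner in d.values() for key2 in inner})
  let key2s : List String :=
    PySem.List.sorted
      (PySem.Set.ofList (dd.values.flatMap (fun inner => (PySem.Dict.mk inner).keys)))
      (fun k => k) false
  -- {key2: {key1: d[key1][key2] for key1 in sorted(d) if key2 in d[key1]} for key2 in key2s}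
  key2s.map (fun key2 =>
    (key2,
      ((PySem.List.sorted dd.keys (fun k => k) false).filter
          (fun key1 => (PySem.Dict.mk (dd.getD key1 [])).contains key2)).map
        (fun key1 => (key1, (PySem.Dict.mk (dd.getD key1 [])).getD key2 0))))

-- ===== PRECONDITION & SPEC =====
-- Pre_ excludes association lists with duplicate keys (at the outer level or inside an inner
-- list): such lists do not represent any Python dict, so A is never run on them.
def Pre_swap_dictionary_keys (key1_to_key2_to_value : List (String × List (String × Int))) : Prop :=
  (key1_to_key2_to_value.map (fun p => p.1)).Nodup ∧
  ∀ p ∈ key1_to_key2_to_value, (p.2.map (fun q => q.1)).Nodup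
instance (key1_to_key2_to_value : List (String × List (String × Int))) : Decidable (Pre_swap_dictionary_keys key1_to_key2_to_value) := by unfold Pre_swap_dictionary_keys; infer_instance

def pvWitness_swap_dictionary_keys : (List (String × List (String × Int))) :=
  [("a", [("x", 1), ("y", 2)]), ("b", [("x", 3)])]

def Spec_swap_dictionary_keys (key1_to_key2_to_value : List (String × List (String × Int))) (out : List (String × List (String × Int))) : Prop := out = swap_dictionary_keys_alt key1_to_key2_to_value
instance (key1_to_key2_to_value : List (String × List (String × Int))) (out : List (String × List (String × Int))) : Decidable (Spec_swap_dictionary_keys key1_to_key2_to_value out) := by unfold Spec_swap_dictionary_keys; infer_instance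

-- ===== CLAIM (what is proved, stated in full; the proofs are below) =====
def Claim_equal_swap_dictionary_keys : Prop := ∀ (key1_to_key2_to_value : List (String × List (String × Int))), Dom_swap_dictionary_keys key1_to_key2_to_value → Pre_swap_dictionary_keys key1_to_key2_to_value → Spec_swap_dictionary_keys key1_to_key2_to_value (swap_dictionary_keys key1_to_key2_to_value)

-- ===== LEMMAS AND PROOFS =====

-- The flat list of (key2, key1) pairs of the input, in source order.
def pvL (kv : List (String × List (String × Int))) : List (String × String) :=
  kv.flatMap (fun p => p.2.map (fun q => (q.1, p.1)))

-- Python's lexicographic strict / non-strict order on string pairs.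
def pvLexLt (a b : String × String) : Prop := a.1 < b.1 ∨ (a.1 = b.1 ∧ a.2 < b.2)
def pvLexLe (a b : String × String) : Prop := a.1 < b.1 ∨ (a.1 = b.1 ∧ a.2 ≤ b.2)

-- The sorted pair list, the value lookup, and the common grouped output of both ports.
def pvS (kv : List (String × List (String × Int))) : List (String × String) :=
  PySem.List.sorted2 (pvL kv) (fun p => p.1) (fun p => p.2) false
def pvF (kv : List (String × List (String × Int))) (p : String × String) : Int :=
  (PySem.Dict.mk ((PySem.Dict.mk kv).getD p.2 [])).getD p.1 0
def pvOut (kv : List (String × List (String × Int))) : List (String × List (String × Int)) :=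
  (PySem.List.dedup ((pvS kv).map (fun p => p.1))).map (fun k =>
    (k, ((pvS kv).filter (fun p => p.1 == k)).map (fun p => (p.2, pvF kv p))))

theorem pvL_mem (kv : List (String × List (String × Int))) (k2 k1 : String) :
    (k2, k1) ∈ pvL kv ↔ ∃ p ∈ kv, p.1 = k1 ∧ k2 ∈ p.2.map (fun q => q.1) := by
  simp [pvL, List.mem_flatMap, List.mem_map]

theorem pvLexLt_of_le_ne (a b : String × String) (h : pvLexLe a b) (hne : a ≠ b) : pvLexLt a b := by
  rcases h with h | ⟨h1, h2⟩
  · exact Or.inl h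
  · refine Or.inr ⟨h1, lt_of_le_of_ne h2 ?_⟩
    intro h3
    exact hne (Prod.ext h1 h3)

theorem pvAdd_cons (k : String) (ys : List String) (hk : k ∉ ys) :
    ∀ s : PySem.Set String, (ys.foldl PySem.Set.add (k :: s)) = k :: ys.foldl PySem.Set.add s := by
  induction ys with
  | nil => intro s; rfl
  | cons y ys ih =>
    intro s
    simp only [List.mem_cons, not_or] at hk
    have h1 : PySem.Set.add (k :: s) y = k :: PySem.Set.add s y := by
      simp [PySem.Set.add, PySem.Set.contains, Ne.symm hk.1]
      split_ifs <;> rfl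
    simp only [List.foldl_cons, h1]
    exact ih hk.2 _

theorem pvOfList_run (k : String) (xs ys : List String)
    (hx : ∀ x ∈ xs, x = k) (hne : xs ≠ []) (hk : k ∉ ys) :
    PySem.Set.ofList (xs ++ ys) = k :: PySem.Set.ofList ys := by
  have h1 : PySem.Set.ofList xs = [k] := by
    have h2 : ∀ (l : List String), (∀ x ∈ l, x = k) → l.foldl PySem.Set.add [k] = [k] := by
      intro l
      induction l with
      | nil => intro _; rfl
      | cons y l ih =>
        intro h
        have : y = k := h y (List.mem_cons_self)
        subst this
        have : PySem.Set.add [y] y = [y] := by simp [PySem.Set.add, PySem.Set.contains]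
        simp only [List.foldl_cons, this]
        exact ih (fun x hx => h x (List.mem_cons_of_mem _ hx))
    cases xs with
    | nil => exact absurd rfl hne
    | cons x xs =>
      have hx1 : x = k := hx x List.mem_cons_self
      subst hx1
      rw [PySem.Set.ofList_eq_foldl]
      simp only [List.foldl_cons]
      have : PySem.Set.add [] x = [x] := rfl
      rw [this]
      exact h2 xs (fun y hy => hx y (List.mem_cons_of_mem _ hy))
  rw [PySem.Set.ofList_eq_foldl, List.foldl_append, ← PySem.Set.ofList_eq_foldl, h1,
    pvAdd_cons k ys hk, ← PySem.Set.ofList_eq_foldl]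

theorem pvGetD_eq (kv : List (String × List (String × Int)))
    (h1 : (kv.map (fun p => p.1)).Nodup) {p : String × List (String × Int)} (hp : p ∈ kv) :
    (PySem.Dict.mk kv).getD p.1 [] = p.2 := by
  induction kv with
  | nil => cases hp
  | cons a kv ih =>
    simp only [List.map_cons, List.nodup_cons] at h1
    rcases List.mem_cons.mp hp with h | h
    · subst h
      rw [PySem.Dict.getD_eq_get?_getD, PySem.Dict.get?_mk_cons]
      simp
    · have hne : a.1 ≠ p.1 := by
        intro he
        exact h1.1 (he ▸ (List.mem_map.mpr ⟨p, h, rfl⟩))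
      rw [PySem.Dict.getD_eq_get?_getD, PySem.Dict.get?_mk_cons]
      simp only [beq_iff_eq, hne, if_false, ← PySem.Dict.getD_eq_get?_getD]
      exact ih h1.2 h

theorem pvFlat_eq (kv : List (String × List (String × Int)))
    (h1 : (kv.map (fun p => p.1)).Nodup) :
    ((PySem.Dict.mk kv).keys.flatMap (fun k1 =>
      ((PySem.Dict.mk kv).getD k1 []).map (fun q => (q.1, k1)))) = pvL kv := by
  have hkeys : (PySem.Dict.mk kv).keys = kv.map (fun p => p.1) := rfl
  rw [hkeys, List.flatMap_map, pvL]
  apply List.flatMap_congr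
  intro p hp
  rw [pvGetD_eq kv h1 hp]

theorem pvInsert0_getD (l : List String) (d : PySem.Dict String Int)
    (h : ∀ k, d.getD k 0 = 0) (k : String) :
    (l.foldl (fun d k2 => d.insert k2 0) d).getD k 0 = 0 := by
  induction l generalizing d with
  | nil => exact h k
  | cons x l ih =>
    simp only [List.foldl_cons]
    apply ih
    intro k'
    by_cases hx : k' = x
    · subst hx; rw [PySem.Dict.getD_insert_self]
    · rw [PySem.Dict.getD_insert_of_ne _ _ _ hx]; exact h k'

theorem pvOfList_sublist {α : Type} [BEq α] [LawfulBEq α] (xs : List α) :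
    (PySem.Set.ofList xs).Sublist xs := by
  induction xs with
  | nil => exact List.Sublist.refl _
  | cons x xs ih =>
    rw [PySem.Set.ofList_cons]
    exact List.Sublist.cons₂ x (List.Sublist.trans List.filter_sublist ih)

theorem pvOfList_pairwise_le (xs : List String) (h : xs.Pairwise (fun a b => a ≤ b)) :
    (PySem.Set.ofList xs).Pairwise (fun a b => a ≤ b) :=
  List.Pairwise.sublist (pvOfList_sublist xs) h

theorem pvL_nodup (kv : List (String × List (String × Int))) (h : Pre_swap_dictionary_keys kv) : (pvL kv).Nodup := by
  obtain ⟨h1, h2⟩ := h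
  induction kv with
  | nil => exact List.nodup_nil
  | cons a kv ih =>
    simp only [pvL, List.flatMap_cons] at *
    have hsnd : ∀ x ∈ pvL kv, x.2 ∈ kv.map (fun p => p.1) := by
      intro x hx
      simp only [pvL, List.mem_flatMap, List.mem_map] at hx
      obtain ⟨p, hp, q, hq, he⟩ := hx
      exact List.mem_map.mpr ⟨p, hp, by rw [← he]⟩
    apply List.Nodup.append
    · have hn := h2 a (List.mem_cons_self)
      have hmm : a.2.map (fun q => (q.1, a.1)) = (a.2.map (fun q => q.1)).map (fun k2 => (k2, a.1)) := by
        rw [List.map_map]; rfl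
      rw [hmm]
      exact hn.map (fun k2 k2' he => congrArg Prod.fst he)
    · exact ih (by simpa using h1.of_cons) (fun p hp => h2 p (List.mem_cons_of_mem _ hp))
    · intro x hx hx'
      have h3 : x.2 = a.1 := by
        simp only [List.mem_map] at hx
        obtain ⟨q, hq, he⟩ := hx
        rw [← he]
      have h4 := hsnd x hx'
      rw [h3] at h4
      simp only [List.map_cons, List.nodup_cons] at h1
      exact h1.1 h4

theorem pvLexLe_trans {a b c : String × String} (h1 : pvLexLe a b) (h2 : pvLexLe b c) : pvLexLe a c := by
  rcases h1 with h1 | ⟨h1, h1'⟩ <;> rcases h2 with h2 | ⟨h2, h2'⟩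
  · exact Or.inl (lt_trans h1 h2)
  · exact Or.inl (h2 ▸ h1)
  · exact Or.inl (h1 ▸ h2)
  · exact Or.inr ⟨h1.trans h2, le_trans h1' h2'⟩

theorem pvBefore_true {a b : String × String}
    (h : (decide (a.1 < b.1) || (!decide (b.1 < a.1) && decide (a.2 < b.2))) = true) : pvLexLe a b := by
  simp only [Bool.or_eq_true, Bool.and_eq_true, Bool.not_eq_true', decide_eq_true_eq,
    decide_eq_false_iff_not] at h
  rcases h with h | ⟨h1, h2⟩
  · exact Or.inl h
  · by_cases hlt : a.1 < b.1
    · exact Or.inl hlt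
    · exact Or.inr ⟨le_antisymm (not_lt.mp h1) (not_lt.mp hlt), le_of_lt h2⟩

theorem pvBefore_false {a b : String × String}
    (h : (decide (a.1 < b.1) || (!decide (b.1 < a.1) && decide (a.2 < b.2))) = false) : pvLexLe b a := by
  simp only [Bool.or_eq_false_iff, Bool.and_eq_false_iff, Bool.not_eq_false', decide_eq_true_eq,
    decide_eq_false_iff_not] at h
  rcases h with ⟨h1, h2 | h2⟩
  · exact Or.inl h2
  · rcases lt_or_eq_of_le (not_lt.mp h1) with hlt | heq
    · exact Or.inl hlt
    · exact Or.inr ⟨heq, not_lt.mp h2⟩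

theorem pvInsertBy_pairwise (x : String × String) (ys : List (String × String))
    (h : ys.Pairwise pvLexLe) :
    (PySem.List.insertBy
      (fun a b => decide (a.1 < b.1) || (!decide (b.1 < a.1) && decide (a.2 < b.2))) x ys).Pairwise pvLexLe := by
  induction ys with
  | nil => simp [PySem.List.insertBy]
  | cons y ys ih =>
    rw [List.pairwise_cons] at h
    have hstep : PySem.List.insertBy
        (fun a b => decide (a.1 < b.1) || (!decide (b.1 < a.1) && decide (a.2 < b.2))) x (y :: ys)
      = if (decide (x.1 < y.1) || (!decide (y.1 < x.1) && decide (x.2 < y.2))) = true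
        then x :: y :: ys
        else y :: PySem.List.insertBy
          (fun a b => decide (a.1 < b.1) || (!decide (b.1 < a.1) && decide (a.2 < b.2))) x ys := rfl
    rw [hstep]
    split_ifs with hb
    · have hxy := pvBefore_true hb
      exact List.Pairwise.cons
        (by
          intro b hb'
          rcases List.mem_cons.mp hb' with h' | h'
          · exact h' ▸ hxy
          · exact pvLexLe_trans hxy (h.1 b h'))
        (List.Pairwise.cons h.1 h.2)
    · have hbf : (decide (x.1 < y.1) || (!decide (y.1 < x.1) && decide (x.2 < y.2))) = false := by
        simpa using hb
      have hyx := pvBefore_false hbf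
      refine List.Pairwise.cons ?_ (ih h.2)
      intro b hb'
      rcases (PySem.List.mem_insertBy _ _ _ _).mp hb' with h' | h'
      · exact h' ▸ hyx
      · exact h.1 b h'

theorem pvSorted2_pairwise (xs : List (String × String)) :
    (PySem.List.sorted2 xs (fun p => p.1) (fun p => p.2) false).Pairwise pvLexLe := by
  have key : ∀ (l : List (String × String)) (acc : List (String × String)),
      acc.Pairwise pvLexLe →
      (l.foldl (fun acc x => PySem.List.insertBy
        (fun a b => decide (a.1 < b.1) || (!decide (b.1 < a.1) && decide (a.2 < b.2))) x acc) acc).Pairwise pvLexLe := by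
    intro l
    induction l with
    | nil => intro acc h; exact h
    | cons x l ih =>
      intro acc h
      exact ih _ (pvInsertBy_pairwise x acc h)
  exact key xs [] List.Pairwise.nil

theorem pvRunStep (cnt : String → Int) (f : String × String → Int) (k : String) :
    ∀ (R : List (String × String)), (∀ q ∈ R, q.1 = k) → R ≠ [] →
    ∀ (acc : PySem.Dict String Int) (res : PySem.Dict String (PySem.Dict String Int)) (j : Int),
      j + R.length = cnt k →
    R.foldl (fun st p =>
        if st.2.2 + 1 == cnt p.1 then
          (PySem.Dict.empty, st.2.1.insert p.1 (st.1.insert p.2 (f p)), (0 : Int))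
        else
          (st.1.insert p.2 (f p), st.2.1, st.2.2 + 1)) (acc, res, j)
      = (PySem.Dict.empty,
         res.insert k (R.foldl (fun a q => a.insert q.2 (f q)) acc), 0) := by
  intro R
  induction R with
  | nil => intro _ hne; exact absurd rfl hne
  | cons q R ih =>
    intro hk _ acc res j hcnt
    have hq : q.1 = k := hk q List.mem_cons_self
    cases R with
    | nil =>
      simp only [List.length_cons, List.length_nil] at hcnt
      have hfire : (j + 1 == cnt q.1) = true := by
        rw [hq, ← hcnt]; simp
      simp only [List.foldl_cons, List.foldl_nil, hfire]
      rw [hq]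
      simp
    | cons r R' =>
      have hnofire : (j + 1 == cnt q.1) = false := by
        rw [hq]
        simp only [beq_eq_false_iff_ne, ne_eq]
        intro he
        simp only [List.length_cons] at hcnt
        push_cast at hcnt
        omega
      have := ih (fun q' hq' => hk q' (List.mem_cons_of_mem _ hq'))
        (List.cons_ne_nil _ _) (acc.insert q.2 (f q)) res (j+1)
        (by simp only [List.length_cons] at hcnt ⊢; push_cast at hcnt ⊢; omega)
      rw [List.foldl_cons]
      simp only [hnofire, Bool.false_eq_true, if_false]
      rw [this]
      rfl

theorem pvDropWhile_head {α : Type} (p : α → Bool) :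
    ∀ (l : List α) {q : α} {d : List α}, l.dropWhile p = q :: d → p q = false := by
  intro l
  induction l with
  | nil => intro q d h; cases h
  | cons x l ih =>
    intro q d h
    rw [List.dropWhile_cons] at h
    by_cases hx : p x = true
    · rw [if_pos hx] at h; exact ih h
    · rw [if_neg hx] at h
      cases h
      exact Bool.not_eq_true _ ▸ hx

theorem pvMachine (cnt : String → Int) (f : String × String → Int) :
    ∀ (N : Nat) (S : List (String × String)), S.length ≤ N →
    S.Pairwise pvLexLt →
    (∀ p ∈ S, cnt p.1 = ((S.map (fun p => p.1)).count p.1 : Int)) →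
    ∀ (res : PySem.Dict String (PySem.Dict String Int)),
      (∀ p ∈ S, res.contains p.1 = false) →
    (S.foldl (fun st p =>
        if st.2.2 + 1 == cnt p.1 then
          (PySem.Dict.empty, st.2.1.insert p.1 (st.1.insert p.2 (f p)), (0 : Int))
        else
          (st.1.insert p.2 (f p), st.2.1, st.2.2 + 1))
      (PySem.Dict.empty, res, 0)).2.1.items
    = res.items ++ (PySem.List.dedup (S.map (fun p => p.1))).map (fun k =>
        (k, PySem.Dict.mk ((S.filter (fun p => p.1 == k)).map (fun p => (p.2, f p))))) := by
  intro N
  induction N with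
  | zero =>
    intro S hlen _ _ res _
    rw [List.length_eq_zero_iff.mp (Nat.le_zero.mp hlen)]
    simp [PySem.List.dedup]
  | succ N ih =>
    intro S hlen hsort hcnt res hres
    cases hScons : S with
    | nil => simp [PySem.List.dedup]
    | cons phead S' =>
    subst hScons
    set k := phead.1 with hk
    set pred : String × String → Bool := fun q => q.1 == k with hpred
    set t := (phead :: S').takeWhile pred with ht
    set d := (phead :: S').dropWhile pred with hd
    have hS : t ++ d = phead :: S' := List.takeWhile_append_dropWhile
    -- t starts with phead
    have htcons : t = phead :: S'.takeWhile pred := by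
      rw [ht, List.takeWhile_cons, if_pos (by simp [hpred, hk])]
    have htne : t ≠ [] := by rw [htcons]; exact List.cons_ne_nil _ _
    have hmem_t : ∀ q ∈ t, q.1 = k := by
      intro q hq
      have := List.mem_takeWhile_imp hq
      simpa [hpred] using this
    -- pairwise split
    have hsplit := (List.pairwise_append).mp (hS ▸ hsort)
    have ht_sort : t.Pairwise pvLexLt := hsplit.1
    have hd_sort : d.Pairwise pvLexLt := hsplit.2.1
    have hcross : ∀ a ∈ t, ∀ b ∈ d, pvLexLt a b := hsplit.2.2
    -- every fst in d is strictly greater than k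
    have hd_gt : ∀ q ∈ d, k < q.1 := by
      cases hdc : d with
      | nil => intro q hq; exact absurd hq List.not_mem_nil
      | cons q0 d' =>
        have hq0 : pred q0 = false := pvDropWhile_head pred (phead :: S') (hd ▸ hdc)
        have hq0ne : q0.1 ≠ k := by simpa [hpred] using hq0
        have hpq0 : pvLexLt phead q0 := by
          apply hcross phead (htcons ▸ List.mem_cons_self) q0
          rw [hdc]; exact List.mem_cons_self
        have hkq0 : k < q0.1 := by
          rcases hpq0 with h | ⟨h, _⟩
          · exact h
          · exact absurd h.symm hq0ne
        intro q hq
        rcases List.mem_cons.mp hq with h | h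
        · exact h ▸ hkq0
        · have hlt : pvLexLt q0 q := by
            rw [hdc] at hd_sort
            exact (List.pairwise_cons.mp hd_sort).1 q h
          rcases hlt with h' | ⟨h', _⟩
          · exact lt_trans hkq0 h'
          · exact h' ▸ hkq0
    have hd_ne : ∀ q ∈ d, q.1 ≠ k := fun q hq => Ne.symm (ne_of_lt (hd_gt q hq))
    have hk_not_d : k ∉ d.map (fun p => p.1) := by
      intro hkm
      obtain ⟨q, hq, he⟩ := List.mem_map.mp hkm
      exact hd_ne q hq he
    -- counts
    have hmapS : (phead :: S').map (fun p => p.1) = t.map (fun p => p.1) ++ d.map (fun p => p.1) := by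
      rw [← hS, List.map_append]
    have hcount_t : (t.map (fun p => p.1)).count k = t.length := by
      have h1 : (t.map (fun p => p.1)).count k = (t.map (fun p => p.1)).length := by
        rw [List.count_eq_length]
        intro b hb
        obtain ⟨q, hq, he⟩ := List.mem_map.mp hb
        exact (he ▸ (hmem_t q hq)).symm
      rw [h1, List.length_map]
    have hcount_d0 : (d.map (fun p => p.1)).count k = 0 := by
      rw [List.count_eq_zero]
      exact hk_not_d
    have hcnt_k : cnt k = (t.length : Int) := by
      have h0 := hcnt phead List.mem_cons_self
      rw [hmapS, List.count_append, hcount_t, hcount_d0] at h0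
      simpa using h0
    -- run the first run
    have hrun := pvRunStep cnt f k t hmem_t htne PySem.Dict.empty res 0
      (by rw [hcnt_k]; ring)
    -- fold over S = t ++ d
    have hfold : ((phead :: S').foldl (fun st p =>
        if st.2.2 + 1 == cnt p.1 then
          (PySem.Dict.empty, st.2.1.insert p.1 (st.1.insert p.2 (f p)), (0 : Int))
        else
          (st.1.insert p.2 (f p), st.2.1, st.2.2 + 1))
      (PySem.Dict.empty, res, 0))
      = (d.foldl (fun st p =>
        if st.2.2 + 1 == cnt p.1 then
          (PySem.Dict.empty, st.2.1.insert p.1 (st.1.insert p.2 (f p)), (0 : Int))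
        else
          (st.1.insert p.2 (f p), st.2.1, st.2.2 + 1))
      (PySem.Dict.empty,
        res.insert k (t.foldl (fun a q => a.insert q.2 (f q)) PySem.Dict.empty), 0)) := by
      rw [← hS, List.foldl_append, hrun]
    rw [hfold]
    -- IH on d
    have hdlen : d.length ≤ N := by
      have h1 : t.length + d.length = S'.length + 1 := by
        rw [← List.length_append, hS, List.length_cons]
      have h2 : 1 ≤ t.length := by
        rw [htcons]; simp [List.length_cons]
      have h3 : S'.length + 1 ≤ N + 1 := by simpa using hlen
      omega
    have hdcnt : ∀ q ∈ d, cnt q.1 = ((d.map (fun p => p.1)).count q.1 : Int) := by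
      intro q hq
      have hqS : q ∈ phead :: S' := by rw [← hS]; exact List.mem_append_right _ hq
      rw [hcnt q hqS, hmapS, List.count_append]
      have : (t.map (fun p => p.1)).count q.1 = 0 := by
        rw [List.count_eq_zero]
        intro hmm
        obtain ⟨r, hr, he⟩ := List.mem_map.mp hmm
        exact hd_ne q hq (by rw [← he, hmem_t r hr])
      rw [this]
      simp
    have hdres : ∀ q ∈ d, (res.insert k (t.foldl (fun a q => a.insert q.2 (f q)) PySem.Dict.empty)).contains q.1 = false := by
      intro q hq
      rw [PySem.Dict.contains_insert]
      have h1 : (q.1 == k) = false := by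
        simp [hd_ne q hq]
      have h2 : res.contains q.1 = false :=
        hres q (by rw [← hS]; exact List.mem_append_right _ hq)
      rw [h1, h2]
      rfl
    rw [ih d hdlen hd_sort hdcnt _ hdres]
    -- assemble items
    have hfresh : res.contains k = false := hres phead List.mem_cons_self
    have hins := PySem.Dict.items_insert_of_not_contains res
      (t.foldl (fun a q => a.insert q.2 (f q)) PySem.Dict.empty) hfresh
    rw [hins]
    -- the accumulated run dict
    have ht_snd_nodup : (t.map (fun p => p.2)).Nodup := by
      have h1 : t.Pairwise (fun a b => a.2 < b.2) := by
        apply List.Pairwise.imp_of_mem ?_ ht_sort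
        intro a b ha hb hab
        rcases hab with h | ⟨_, h⟩
        · rw [hmem_t a ha, hmem_t b hb] at h
          exact absurd h (lt_irrefl _)
        · exact h
      exact (List.pairwise_map.mpr (h1.imp (fun h => ne_of_lt h)))
    have hacc : (t.foldl (fun a q => a.insert q.2 (f q)) PySem.Dict.empty)
        = PySem.Dict.mk (t.map (fun p => (p.2, f p))) := by
      apply PySem.Dict.ext
      rw [PySem.Dict.items_foldl_insert_fresh t (fun q => q.2) f PySem.Dict.empty
        (fun a _ => PySem.Dict.contains_empty _) ht_snd_nodup]
      rfl
    -- dedup splits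
    have hded : PySem.List.dedup ((phead :: S').map (fun p => p.1))
        = k :: PySem.List.dedup (d.map (fun p => p.1)) := by
      rw [hmapS, PySem.List.dedup_eq_ofList, PySem.List.dedup_eq_ofList]
      refine pvOfList_run k _ _ ?_ ?_ hk_not_d
      · intro x hx
        obtain ⟨q, hq, he⟩ := List.mem_map.mp hx
        exact he ▸ hmem_t q hq
      · rw [htcons]; simp
    -- filters
    have hfil_k : (phead :: S').filter (fun p => p.1 == k) = t := by
      rw [← hS, List.filter_append]
      have h1 : t.filter (fun p => p.1 == k) = t :=
        List.filter_eq_self.mpr (fun q hq => by simp [hmem_t q hq])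
      have h2 : d.filter (fun p => p.1 == k) = [] :=
        List.filter_eq_nil_iff.mpr (fun q hq => by simp [hd_ne q hq])
      rw [h1, h2, List.append_nil]
    have hfil_rest : ∀ k' ∈ PySem.List.dedup (d.map (fun p => p.1)),
        (phead :: S').filter (fun p => p.1 == k') = d.filter (fun p => p.1 == k') := by
      intro k' hk'
      have hk'mem : k' ∈ d.map (fun p => p.1) := by
        rw [PySem.List.dedup_eq_ofList] at hk'
        exact (PySem.Set.mem_ofList _ _).mp hk'
      have hkne : k ≠ k' := by
        intro he
        exact hk_not_d (he ▸ hk'mem)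
      rw [← hS, List.filter_append]
      have h1 : t.filter (fun p => p.1 == k') = [] :=
        List.filter_eq_nil_iff.mpr (fun q hq => by simp [hmem_t q hq, hkne])
      rw [h1, List.nil_append]
    rw [hded, List.map_cons, hfil_k, hacc, List.append_assoc, List.singleton_append]
    congr 2
    exact List.map_congr_left (fun k' hk' => by rw [hfil_rest k' hk'])


-- A loop over one inner dict updates the two accumulators independently.
theorem pvInnerSplit (k1 : String) (l : List String) :
    ∀ (s : PySem.Set (String × String)) (dct : PySem.Dict String Int),
    l.foldl (fun st k2 => (PySem.Set.add st.1 (k2, k1), st.2.insert k2 0)) (s, dct)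
    = (l.foldl (fun s k2 => PySem.Set.add s (k2, k1)) s, l.foldl (fun d k2 => d.insert k2 0) dct) := by
  induction l with
  | nil => intro s dct; rfl
  | cons x l ih => intro s dct; exact ih _ _

-- A's whole nested loop is two independent nested loops.
theorem pvNestedSplit (ks : List String) (g : String → List String) :
    ∀ (s : PySem.Set (String × String)) (dct : PySem.Dict String Int),
    ks.foldl (fun st k1 => (g k1).foldl (fun st k2 => (PySem.Set.add st.1 (k2, k1), st.2.insert k2 0)) st) (s, dct)
    = (ks.foldl (fun s k1 => (g k1).foldl (fun s k2 => PySem.Set.add s (k2, k1)) s) s,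
       ks.foldl (fun d k1 => (g k1).foldl (fun d k2 => d.insert k2 0) d) dct) := by
  induction ks with
  | nil => intro s dct; rfl
  | cons k1 ks ih =>
    intro s dct
    simp only [List.foldl_cons, pvInnerSplit]
    exact ih _ _

theorem pvSetNested (ks : List String) (g : String → List String) (s : PySem.Set (String × String)) :
    ks.foldl (fun s k1 => (g k1).foldl (fun s k2 => PySem.Set.add s (k2, k1)) s) s
    = (ks.flatMap (fun k1 => (g k1).map (fun k2 => (k2, k1)))).foldl PySem.Set.add s := by
  have h : (fun (s : PySem.Set (String × String)) k1 =>
      (g k1).foldl (fun s k2 => PySem.Set.add s (k2, k1)) s)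
      = (fun s k1 => ((g k1).map (fun k2 => (k2, k1))).foldl PySem.Set.add s) := by
    funext s k1
    rw [List.foldl_map]
  rw [h, ← List.foldl_flatMap]

theorem pvDictNested0 (ks : List String) (g : String → List String) :
    ∀ (dct : PySem.Dict String Int), (∀ k, dct.getD k 0 = 0) → ∀ k,
    (ks.foldl (fun d k1 => (g k1).foldl (fun d k2 => d.insert k2 0) d) dct).getD k 0 = 0 := by
  induction ks with
  | nil => intro dct h k; exact h k
  | cons k1 ks ih =>
    intro dct h k
    simp only [List.foldl_cons]
    exact ih _ (fun k' => pvInsert0_getD (g k1) dct h k') k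

-- properties of pvS
theorem pvS_perm (kv : List (String × List (String × Int))) : (pvS kv).Perm (pvL kv) :=
  PySem.List.sorted2_perm _ _ _ _

theorem pvS_pairwise (kv : List (String × List (String × Int)))
    (h : Pre_swap_dictionary_keys kv) : (pvS kv).Pairwise pvLexLt := by
  have h1 : (pvS kv).Pairwise pvLexLe := pvSorted2_pairwise (pvL kv)
  have h2 : (pvS kv).Nodup := ((pvS_perm kv).nodup_iff).mpr (pvL_nodup kv h)
  exact (h1.and h2).imp (fun hab => pvLexLt_of_le_ne _ _ hab.1 hab.2)

-- A's port computes pvOut.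
theorem pvA_char (kv : List (String × List (String × Int)))
    (h : Pre_swap_dictionary_keys kv) : swap_dictionary_keys kv = pvOut kv := by
  obtain ⟨h1, h2⟩ := h
  have hLn : (pvL kv).Nodup := pvL_nodup kv ⟨h1, h2⟩
  have hflat : (PySem.Dict.mk kv).keys.flatMap
      (fun k1 => ((PySem.Dict.mk ((PySem.Dict.mk kv).getD k1 [])).keys).map (fun k2 => (k2, k1)))
      = pvL kv := by
    rw [← pvFlat_eq kv h1]
    apply List.flatMap_congr
    intro k1 _
    show (((PySem.Dict.mk kv).getD k1 []).map (fun q => q.1)).map (fun k2 => (k2, k1)) = _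
    rw [List.map_map]
    rfl
  have hnest := pvNestedSplit ((PySem.Dict.mk kv).keys)
    (fun k1 => (PySem.Dict.mk ((PySem.Dict.mk kv).getD k1 [])).keys)
    PySem.Set.empty PySem.Dict.empty
  have hset : ((PySem.Dict.mk kv).keys.foldl (fun s k1 =>
      ((PySem.Dict.mk ((PySem.Dict.mk kv).getD k1 [])).keys).foldl (fun s k2 => PySem.Set.add s (k2, k1)) s)
      PySem.Set.empty) = pvL kv := by
    rw [pvSetNested]
    have he : ((PySem.Dict.mk kv).keys.flatMap
        (fun k1 => ((PySem.Dict.mk ((PySem.Dict.mk kv).getD k1 [])).keys).map (fun k2 => (k2, k1)))).foldl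
        PySem.Set.add PySem.Set.empty
        = PySem.Set.ofList ((PySem.Dict.mk kv).keys.flatMap
        (fun k1 => ((PySem.Dict.mk ((PySem.Dict.mk kv).getD k1 [])).keys).map (fun k2 => (k2, k1)))) :=
      (PySem.Set.ofList_eq_foldl _).symm
    rw [he, hflat]
    exact PySem.Set.ofList_eq_self_of_nodup _ hLn
  simp only [swap_dictionary_keys]
  rw [hnest]
  simp only [hset]
  set D2 : PySem.Dict String Int := ((PySem.Dict.mk kv).keys.foldl (fun d k1 =>
      ((PySem.Dict.mk ((PySem.Dict.mk kv).getD k1 [])).keys).foldl (fun d k2 => d.insert k2 0) d)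
      PySem.Dict.empty) with hD2
  have hld0 : ∀ k, D2.getD k 0 = 0 := by
    rw [hD2]
    exact pvDictNested0 _ _ PySem.Dict.empty (fun k => by simp [PySem.Dict.getD_empty])
  have hcnt : ∀ k, ((pvL kv).foldl (fun ld p => ld.modify p.1 0 (· + 1)) D2).getD k 0
      = (((pvL kv).map (fun p => p.1)).count k : Int) := by
    intro k
    have hm : (pvL kv).foldl (fun ld p => ld.modify p.1 0 (· + 1)) D2
        = ((pvL kv).map (fun p => p.1)).foldl (fun ld x => ld.modify x 0 (· + 1)) D2 := by
      rw [List.foldl_map]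
    rw [hm, PySem.Dict.getD_foldl_modify_add_one, hld0 k, zero_add]
  have hpair : (pvS kv).Pairwise pvLexLt := pvS_pairwise kv ⟨h1, h2⟩
  have hcnt' : ∀ p ∈ pvS kv,
      ((pvL kv).foldl (fun ld p => ld.modify p.1 0 (· + 1)) D2).getD p.1 0
      = (((pvS kv).map (fun p => p.1)).count p.1 : Int) := by
    intro p _
    rw [hcnt p.1, List.Perm.count_eq ((pvS_perm kv).map (fun p => p.1))]
  have hres0 : ∀ p ∈ pvS kv,
      (PySem.Dict.empty : PySem.Dict String (PySem.Dict String Int)).contains p.1 = false :=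
    fun p _ => PySem.Dict.contains_empty p.1
  have hmach := pvMachine
    (fun x => ((pvL kv).foldl (fun ld p => ld.modify p.1 0 (· + 1)) D2).getD x 0)
    (fun p => (PySem.Dict.mk ((PySem.Dict.mk kv).getD p.2 [])).getD p.1 0)
    (pvS kv).length (pvS kv) le_rfl hpair hcnt' PySem.Dict.empty hres0
  beta_reduce at hmach
  rw [show (PySem.List.sorted2 (pvL kv) (fun p => p.1) (fun p => p.2) false) = pvS kv from rfl]
  rw [hmach]
  simp only [pvOut, pvF, pvS, List.map_map, PySem.Dict.empty, List.nil_append]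
  apply List.map_congr_left
  intro x _
  rfl

-- B's port computes pvOut.
theorem pvB_char (kv : List (String × List (String × Int)))
    (h : Pre_swap_dictionary_keys kv) : swap_dictionary_keys_alt kv = pvOut kv := by
  obtain ⟨h1, h2⟩ := h
  have hLn : (pvL kv).Nodup := pvL_nodup kv ⟨h1, h2⟩
  have hSpair : (pvS kv).Pairwise pvLexLt := pvS_pairwise kv ⟨h1, h2⟩
  have hSnodup : (pvS kv).Nodup := ((pvS_perm kv).nodup_iff).mpr hLn
  -- the raw key2 source list is the fst-projection of pvL
  have hbase : (PySem.Dict.mk kv).values.flatMap (fun inner => (PySem.Dict.mk inner).keys)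
      = (pvL kv).map (fun p => p.1) := by
    simp [pvL, PySem.Dict.values, List.map_flatMap, List.flatMap_map, List.map_map]
    apply List.flatMap_congr
    intro p _
    apply List.map_congr_left
    intro q _
    rfl
  -- key2s = dedup of the fsts of the sorted pair list
  have hK : PySem.List.sorted
      (PySem.Set.ofList ((PySem.Dict.mk kv).values.flatMap (fun inner => (PySem.Dict.mk inner).keys)))
      (fun k => k) false
      = PySem.List.dedup ((pvS kv).map (fun p => p.1)) := by
    rw [hbase]
    apply PySem.List.sorted_id_eq_of_perm_of_pairwise
    · rw [PySem.List.dedup_eq_ofList]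
      rw [List.perm_ext_iff_of_nodup (PySem.Set.nodup_ofList _) (PySem.Set.nodup_ofList _)]
      intro a
      rw [PySem.Set.mem_ofList, PySem.Set.mem_ofList]
      exact List.Perm.mem_iff ((pvS_perm kv).map (fun p => p.1))
    · rw [PySem.List.dedup_eq_ofList]
      apply pvOfList_pairwise_le
      apply List.pairwise_map.mpr
      apply hSpair.imp
      intro a b hab
      rcases hab with hx | ⟨hx, _⟩
      · exact le_of_lt hx
      · exact le_of_eq hx
  -- per key2: the filtered sorted key1 list equals the snds of the pvS-run
  have hinner : ∀ k ∈ PySem.List.dedup ((pvS kv).map (fun p => p.1)),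
      ((PySem.List.sorted (PySem.Dict.mk kv).keys (fun k => k) false).filter
        (fun key1 => (PySem.Dict.mk ((PySem.Dict.mk kv).getD key1 [])).contains k)).map
        (fun key1 => (key1, (PySem.Dict.mk ((PySem.Dict.mk kv).getD key1 [])).getD k 0))
      = ((pvS kv).filter (fun p => p.1 == k)).map (fun p => (p.2, pvF kv p)) := by
    intro k _
    have hu_pair : (((pvS kv).filter (fun p => p.1 == k)).map (fun p => p.2)).Pairwise (· < ·) := by
      apply List.pairwise_map.mpr
      apply List.Pairwise.imp_of_mem ?_ (List.Pairwise.sublist List.filter_sublist hSpair)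
      intro a b ha hb hab
      have hak : a.1 = k := by simpa using List.of_mem_filter ha
      have hbk : b.1 = k := by simpa using List.of_mem_filter hb
      rcases hab with hx | ⟨_, hx⟩
      · rw [hak, hbk] at hx; exact absurd hx (lt_irrefl _)
      · exact hx
    have hv_pair : ((PySem.List.sorted (PySem.Dict.mk kv).keys (fun k => k) false).filter
        (fun key1 => (PySem.Dict.mk ((PySem.Dict.mk kv).getD key1 [])).contains k)).Pairwise
        (fun a b => a ≤ b) :=
      List.Pairwise.sublist List.filter_sublist (PySem.List.sorted_pairwise _ _)
    have hperm : (((PySem.List.sorted (PySem.Dict.mk kv).keys (fun k => k) false).filter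
        (fun key1 => (PySem.Dict.mk ((PySem.Dict.mk kv).getD key1 [])).contains k))).Perm
        (((pvS kv).filter (fun p => p.1 == k)).map (fun p => p.2)) := by
      have hv_nodup : ((PySem.List.sorted (PySem.Dict.mk kv).keys (fun k => k) false).filter
          (fun key1 => (PySem.Dict.mk ((PySem.Dict.mk kv).getD key1 [])).contains k)).Nodup :=
        (List.Nodup.sublist List.filter_sublist (((PySem.List.sorted_perm _ _ _).nodup_iff).mpr h1))
      have hu_nodup : (((pvS kv).filter (fun p => p.1 == k)).map (fun p => p.2)).Nodup :=
        hu_pair.imp (fun h => ne_of_lt h)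
      rw [List.perm_ext_iff_of_nodup hv_nodup hu_nodup]
      intro k1
      constructor
      · intro hmem
        have hks : k1 ∈ PySem.List.sorted (PySem.Dict.mk kv).keys (fun k => k) false :=
          List.mem_of_mem_filter hmem
        have hc : (PySem.Dict.mk ((PySem.Dict.mk kv).getD k1 [])).contains k = true := by
          simpa using List.of_mem_filter hmem
        have hk1 : k1 ∈ kv.map (fun p => p.1) :=
          ((PySem.List.sorted_perm _ _ _).mem_iff).mp hks
        have hk2 : k ∈ ((PySem.Dict.mk kv).getD k1 []).map (fun q => q.1) := by
          have := (PySem.Dict.contains_iff_mem_keys _ _).mp hc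
          simpa [PySem.Dict.keys] using this
        have hmemL : (k, k1) ∈ pvL kv := by
          rw [pvL_mem]
          obtain ⟨p, hp, he⟩ := List.mem_map.mp hk1
          refine ⟨p, hp, he, ?_⟩
          rw [← he, pvGetD_eq kv h1 hp] at hk2
          exact hk2
        have hmemS : (k, k1) ∈ pvS kv := ((pvS_perm kv).mem_iff).mpr hmemL
        apply List.mem_map.mpr
        refine ⟨(k, k1), ?_, rfl⟩
        apply List.mem_filter.mpr
        exact ⟨hmemS, by simp⟩
      · intro hmem
        obtain ⟨p, hp, he⟩ := List.mem_map.mp hmem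
        have hpS : p ∈ pvS kv := List.mem_of_mem_filter hp
        have hpk : p.1 = k := by simpa using List.of_mem_filter hp
        have hmemL : (k, k1) ∈ pvL kv := by
          have : p = (k, k1) := by
            rw [← hpk, ← he]
          rw [← this]
          exact ((pvS_perm kv).mem_iff).mp hpS
        rw [pvL_mem] at hmemL
        obtain ⟨q, hq, hq1, hq2⟩ := hmemL
        apply List.mem_filter.mpr
        constructor
        · apply ((PySem.List.sorted_perm _ _ _).mem_iff).mpr
          exact List.mem_map.mpr ⟨q, hq, hq1⟩
        · apply (PySem.Dict.contains_iff_mem_keys _ _).mpr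
          have : (PySem.Dict.mk kv).getD k1 [] = q.2 := by
            rw [← hq1]
            exact pvGetD_eq kv h1 hq
          rw [this]
          simpa [PySem.Dict.keys] using hq2
    have hveq : ((PySem.List.sorted (PySem.Dict.mk kv).keys (fun k => k) false).filter
        (fun key1 => (PySem.Dict.mk ((PySem.Dict.mk kv).getD key1 [])).contains k))
        = (((pvS kv).filter (fun p => p.1 == k)).map (fun p => p.2)) :=
      PySem.List.eq_of_perm_of_pairwise_le_of_pairwise_lt (fun x => x) hperm hv_pair hu_pair
    rw [hveq, List.map_map]
    apply List.map_congr_left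
    intro p hp
    have hpk : p.1 = k := by simpa using List.of_mem_filter hp
    simp [Function.comp, pvF, hpk]
  simp only [swap_dictionary_keys_alt]
  rw [hK]
  simp only [pvOut]
  apply List.map_congr_left
  intro k hk
  rw [hinner k hk]
-- ===== VERDICT (by name: the statement is the Claim_ definition above) =====
theorem swap_dictionary_keys_spec : Claim_equal_swap_dictionary_keys := by
  intro kv _ hpre
  unfold Spec_swap_dictionary_keys
  rw [pvA_char kv hpre, pvB_char kv hpre]
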